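-- pv_equiv track=rewrite | github.com/sollahiro/mebuki | blue_ticker/analysis/segment_extractor.py | _grid_to_markdown
-- ===== SOURCE A (Python) =====
-- def _grid_to_markdown(grid: list[list[str]]) -> str:
--     if not grid:
--         return ""
--     col_count = max(len(row) for row in grid)
--     col_widths = [
--         max((len(row[c]) if c < len(row) else 0) for row in grid)
--         for c in range(col_count)
--     ]
--     lines: list[str] = []
--     for i, row in enumerate(grid):
--         cells = [(row[c] if c < len(row) else "").ljust(col_widths[c]) for c in range(col_count)]
--         lines.append("| " + " | ".join(cells) + " |")
--         if i == 0:
--             lines.append("|" + "|".join("-" * (w + 2) for w in col_widths) + "|")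
--     return "\n".join(lines)
-- ===== SOURCE B (Python) =====
-- def _merge_widths(ws: list[int], row: list[str]) -> list[int]:
--     """Merge one row's cell lengths into the running column-width list."""
--     if not row:
--         return ws
--     if not ws:
--         return [len(row[0])] + _merge_widths([], row[1:])
--     return [max(ws[0], len(row[0]))] + _merge_widths(ws[1:], row[1:])
--
--
-- def _pad_row(row: list[str], ws: list[int]) -> list[str]:
--     """Left-justify the row's cells to the widths; missing cells become blanks."""
--     if not ws:
--         return []
--     if not row:
--         return ["".ljust(ws[0])] + _pad_row([], ws[1:])
--     return [row[0].ljust(ws[0])] + _pad_row(row[1:], ws[1:])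
--
--
-- def _grid_to_markdown(grid: list[list[str]]) -> str:
--     widths: list[int] = []
--     for row in grid:
--         widths = _merge_widths(widths, row)
--     if not grid:
--         return ""
--     sep = "|" + "|".join("-" * (w + 2) for w in widths) + "|"
--     body = ["| " + " | ".join(_pad_row(row, widths)) + " |" for row in grid]
--     return "\n".join(body[:1] + [sep] + body[1:])
-- ===== Notes on version B (the rewrite author's own statement) =====
-- stated objective: alternative
-- what changed: Column widths are computed in one row-major merge pass (fold of a width-merge over rows) instead of a column-by-column rescan of all rows per column, and the separator line is spliced into the rendered body by list construction instead of a flag inside the rendering loop.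
import Mathlib
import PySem

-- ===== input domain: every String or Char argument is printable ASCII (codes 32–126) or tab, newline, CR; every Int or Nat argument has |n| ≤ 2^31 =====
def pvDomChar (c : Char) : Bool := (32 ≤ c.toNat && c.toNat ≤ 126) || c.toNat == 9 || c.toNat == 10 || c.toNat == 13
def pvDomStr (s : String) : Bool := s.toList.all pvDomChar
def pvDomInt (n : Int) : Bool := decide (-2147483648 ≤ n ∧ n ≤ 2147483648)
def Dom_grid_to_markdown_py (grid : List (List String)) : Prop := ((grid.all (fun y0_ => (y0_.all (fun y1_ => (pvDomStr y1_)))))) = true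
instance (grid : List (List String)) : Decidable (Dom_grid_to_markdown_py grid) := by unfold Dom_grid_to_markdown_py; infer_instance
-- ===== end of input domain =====

-- B computes column widths in one row-major merge pass over the rows (instead of A's
-- per-column rescan of all rows) and splices the separator by list construction; same output.

-- ===== PORT A =====
-- shared rendering helpers (both Pythons call str.ljust and build the same cell strings)
-- s.ljust(w): pad with spaces on the right to width w (never truncates) — exact for Nat w
def pvLjust (s : String) (w : Nat) : String :=
  String.ofList (s.toList ++ List.replicate (w - s.toList.length) ' ')

-- (row[c] if c < len(row) else "")
def pvCell (row : List String) (c : Nat) : String := (row[c]?).getD ""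

-- len(row[c]) if c < len(row) else 0
def pvCellLen (row : List String) (c : Nat) : Nat := ((row[c]?).map (·.toList.length)).getD 0

def grid_to_markdown_py (grid : List (List String)) : String :=
  if grid = [] then ""
  else
    -- col_count = max(len(row) for row in grid)   (grid nonempty, so max? is some)
    let colCount : Nat := ((PySem.List.max? (grid.map (fun row => row.length)) (fun y => y)).getD 0)
    -- col_widths = [max((len(row[c]) if c < len(row) else 0) for row in grid) for c in range(col_count)]
    let colWidths : List Nat := (List.range colCount).map (fun c =>
      (PySem.List.max? (grid.map (fun row => pvCellLen row c)) (fun y => y)).getD 0)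
    -- for i, row in enumerate(grid): … append line; if i == 0 append separator
    let lines : List String := (PySem.List.enumerate grid).foldl (fun lines ir =>
      let cells : List String := (List.range colCount).map (fun c =>
        pvLjust (pvCell ir.2 c) (colWidths.getD c 0))
      let lines := lines ++ ["| " ++ PySem.Str.join " | " cells ++ " |"]
      if ir.1 = 0 then
        lines ++ ["|" ++ PySem.Str.join "|" (colWidths.map (fun w => String.ofList (List.replicate (w + 2) '-'))) ++ "|"]
      else lines) []
    PySem.Str.join "\n" lines

-- ===== PORT B =====
def mergeWidths : List Nat → List String → List Nat
  | ws, [] => ws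
  | [], s :: r => s.toList.length :: mergeWidths [] r
  | w :: ws, s :: r => max w s.toList.length :: mergeWidths ws r

def padRow : List String → List Nat → List String
  | _, [] => []
  | [], w :: ws => pvLjust "" w :: padRow [] ws
  | s :: r, w :: ws => pvLjust s w :: padRow r ws

def grid_to_markdown_py_alt (grid : List (List String)) : String :=
  let widths : List Nat := grid.foldl mergeWidths []
  if grid = [] then ""
  else
    let sep : String :=
      "|" ++ PySem.Str.join "|" (widths.map (fun w => String.ofList (List.replicate (w + 2) '-'))) ++ "|"
    let body : List String := grid.map (fun row => "| " ++ PySem.Str.join " | " (padRow row widths) ++ " |")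
    PySem.Str.join "\n" (body.take 1 ++ [sep] ++ body.drop 1)

-- ===== PRECONDITION & SPEC =====
def Spec_grid_to_markdown_py (grid : List (List String)) (out : String) : Prop := out = grid_to_markdown_py_alt grid
instance (grid : List (List String)) (out : String) : Decidable (Spec_grid_to_markdown_py grid out) := by unfold Spec_grid_to_markdown_py; infer_instance

-- ===== CLAIM (what is proved, stated in full; the proofs are below) =====
def Claim_equal_grid_to_markdown_py : Prop := ∀ (grid : List (List String)), Dom_grid_to_markdown_py grid → Spec_grid_to_markdown_py grid (grid_to_markdown_py grid)

-- ===== LEMMAS AND PROOFS =====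

-- running max with an arbitrary init
theorem foldl_max_init {α : Type} (g : α → Nat) (l : List α) (a : Nat) :
    l.foldl (fun acc x => max acc (g x)) a = max a (l.foldl (fun acc x => max acc (g x)) 0) := by
  induction l generalizing a with
  | nil => simp
  | cons x t ih =>
    simp only [List.foldl_cons]
    rw [ih (max a (g x)), ih (max 0 (g x))]
    omega

def maxLen (grid : List (List String)) : Nat :=
  grid.foldl (fun acc row => max acc row.length) 0

def colMax (grid : List (List String)) (c : Nat) : Nat :=
  grid.foldl (fun acc row => max acc (pvCellLen row c)) 0

theorem mergeWidths_length (ws : List Nat) (r : List String) :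
    (mergeWidths ws r).length = max ws.length r.length := by
  induction r generalizing ws with
  | nil => cases ws <;> simp [mergeWidths]
  | cons s t ih =>
    cases ws with
    | nil => simp [mergeWidths, ih]
    | cons w ws' =>
      simp only [mergeWidths, List.length_cons, ih]
      omega

theorem mergeWidths_getD (ws : List Nat) (r : List String) (c : Nat) :
    (mergeWidths ws r).getD c 0 = max (ws.getD c 0) (pvCellLen r c) := by
  induction r generalizing ws c with
  | nil => cases ws <;> simp [mergeWidths, pvCellLen]
  | cons s t ih =>
    cases ws with
    | nil =>
      cases c with
      | zero => simp [mergeWidths, pvCellLen]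
      | succ c' => simpa [mergeWidths, pvCellLen] using ih [] c'
    | cons w ws' =>
      cases c with
      | zero => simp [mergeWidths, pvCellLen]
      | succ c' => simpa [mergeWidths, pvCellLen] using ih ws' c'

theorem range_map_getD (ws : List Nat) :
    (List.range ws.length).map (fun c => ws.getD c 0) = ws := by
  induction ws with
  | nil => simp
  | cons w t ih =>
    rw [List.length_cons, List.range_succ_eq_map, List.map_cons, List.map_map]
    simpa using ih

-- the fused merge pass computes exactly the column-max table
theorem foldl_mergeWidths (grid : List (List String)) (ws : List Nat) :
    grid.foldl mergeWidths ws =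
      (List.range (max ws.length (maxLen grid))).map
        (fun c => max (ws.getD c 0) (colMax grid c)) := by
  induction grid generalizing ws with
  | nil =>
    simp only [List.foldl_nil, maxLen, colMax, List.foldl_nil]
    simpa using (range_map_getD ws).symm
  | cons r rs ih =>
    rw [List.foldl_cons, ih (mergeWidths ws r)]
    have hlen : maxLen (r :: rs) = max r.length (maxLen rs) := by
      simp only [maxLen, List.foldl_cons]
      rw [foldl_max_init]; omega
    have hcol : ∀ c, colMax (r :: rs) c = max (pvCellLen r c) (colMax rs c) := by
      intro c
      simp only [colMax, List.foldl_cons]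
      rw [foldl_max_init]; omega
    rw [mergeWidths_length]
    have hrange : max (max ws.length r.length) (maxLen rs) = max ws.length (maxLen (r :: rs)) := by
      rw [hlen]; omega
    rw [hrange]
    apply List.map_congr_left
    intro c _
    rw [mergeWidths_getD, hcol]
    omega

-- padRow is the positional cell renderer
theorem padRow_eq (row : List String) (ws : List Nat) :
    padRow row ws = (List.range ws.length).map (fun c => pvLjust (pvCell row c) (ws.getD c 0)) := by
  induction ws generalizing row with
  | nil => cases row <;> simp [padRow]
  | cons w t ih =>
    rw [List.length_cons, List.range_succ_eq_map, List.map_cons, List.map_map]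
    cases row with
    | nil => simp [padRow, pvCell, ih []]
    | cons s r => simp [padRow, pvCell, ih r]

-- the tail of A's enumerate loop (indices ≥ 1) just appends one line per row
theorem foldl_enum_tail {α : Type} (line : α → String) (sep : String) (rs : List α)
    (k : Int) (hk : 1 ≤ k) (acc : List String) :
    (PySem.List.enumerate rs k).foldl (fun lines (ir : Int × α) =>
      if ir.1 = 0 then lines ++ [line ir.2] ++ [sep] else lines ++ [line ir.2]) acc
    = acc ++ rs.map line := by
  induction rs generalizing k acc with
  | nil => simp [PySem.List.enumerate]
  | cons r t ih =>
    have hk0 : ¬ ((k : Int) = 0) := by omega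
    simp only [PySem.List.enumerate, List.foldl_cons, hk0, if_false, List.map_cons]
    rw [ih (k + 1) (by omega)]
    simp

theorem colCount_eq (r : List String) (rs : List (List String)) :
    ((PySem.List.max? ((r :: rs).map (fun row => row.length)) (fun y => y)).getD 0)
      = maxLen (r :: rs) := by
  rw [List.map_cons, PySem.List.max?_id_cons, Option.getD_some, List.foldl_map]
  simp only [maxLen, List.foldl_cons]
  rw [foldl_max_init (fun row => row.length) rs r.length,
      foldl_max_init (fun row => row.length) rs (max 0 r.length)]
  omega

theorem colWidth_eq (r : List String) (rs : List (List String)) (c : Nat) :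
    ((PySem.List.max? ((r :: rs).map (fun row => pvCellLen row c)) (fun y => y)).getD 0)
      = colMax (r :: rs) c := by
  rw [List.map_cons, PySem.List.max?_id_cons, Option.getD_some, List.foldl_map]
  simp only [colMax, List.foldl_cons]
  rw [foldl_max_init (fun row => pvCellLen row c) rs (pvCellLen r c),
      foldl_max_init (fun row => pvCellLen row c) rs (max 0 (pvCellLen r c))]
  omega

theorem widths_eq (r : List String) (rs : List (List String)) :
    (r :: rs).foldl mergeWidths [] = (List.range (maxLen (r :: rs))).map (colMax (r :: rs)) := by
  rw [foldl_mergeWidths]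
  simp

-- ===== VERDICT (by name: the statement is the Claim_ definition above) =====
theorem grid_to_markdown_py_spec : Claim_equal_grid_to_markdown_py := by
  intro grid _
  unfold Spec_grid_to_markdown_py
  cases grid with
  | nil => rfl
  | cons r rs =>
    unfold grid_to_markdown_py grid_to_markdown_py_alt
    simp only [reduceCtorEq, if_false, widths_eq, colCount_eq]
    have hw : (List.range (maxLen (r :: rs))).map (fun c =>
        (PySem.List.max? ((r :: rs).map (fun row => pvCellLen row c)) (fun y => y)).getD 0)
        = (List.range (maxLen (r :: rs))).map (colMax (r :: rs)) := by
      apply List.map_congr_left; intro c _; exact colWidth_eq r rs c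
    rw [hw]
    set W : List Nat := (List.range (maxLen (r :: rs))).map (colMax (r :: rs)) with hW
    have hcells : ∀ row : List String,
        (List.range (maxLen (r :: rs))).map (fun c => pvLjust (pvCell row c) (W.getD c 0))
          = padRow row W := by
      intro row
      rw [padRow_eq]
      have : W.length = maxLen (r :: rs) := by rw [hW]; simp
      rw [this]
    simp only [PySem.List.enumerate, List.foldl_cons, List.nil_append, reduceIte]
    rw [foldl_enum_tail
      (fun row => "| " ++ PySem.Str.join " | " ((List.range (maxLen (r :: rs))).map (fun c =>
        pvLjust (pvCell row c) (W.getD c 0))) ++ " |")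
      ("|" ++ PySem.Str.join "|" (W.map (fun w => String.ofList (List.replicate (w + 2) '-'))) ++ "|")
      rs (0 + 1) (by omega)]
    simp only [List.map_cons, List.take_succ_cons, List.take_zero, List.drop_succ_cons,
      List.drop_zero]
    congr 1
    simp only [List.cons_append, List.nil_append]
    congr 2
    · rw [hcells r]
    · apply List.map_congr_left
      intro row _
      rw [hcells row]
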